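-- pv_equiv track=rewrite | github.com/guserav/LED10_10_48V_Board | calculate_resistor_network.py | count_dip_switch_networks_3
-- ===== SOURCE A (Python) =====
-- def count_dip_switch_networks_3(resistors):
--     r_count = len(resistors)
--     count = 0
--     for i in range(r_count):
--         for j in range(r_count - i):
--                 m = r_count - i - j
--                 count += m
--     return r_count * count
-- ===== SOURCE B (Python) =====
-- def count_dip_switch_networks_3(resistors):
--     n = len(resistors)
--     return n * n * (n + 1) * (n + 2) // 6
-- ===== Notes on version B (the rewrite author's own statement) =====
-- stated objective: faster
-- what changed: Replaced the doubly nested summation loop by the closed-form tetrahedral-number formula n*n*(n+1)*(n+2)//6.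
import Mathlib
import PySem

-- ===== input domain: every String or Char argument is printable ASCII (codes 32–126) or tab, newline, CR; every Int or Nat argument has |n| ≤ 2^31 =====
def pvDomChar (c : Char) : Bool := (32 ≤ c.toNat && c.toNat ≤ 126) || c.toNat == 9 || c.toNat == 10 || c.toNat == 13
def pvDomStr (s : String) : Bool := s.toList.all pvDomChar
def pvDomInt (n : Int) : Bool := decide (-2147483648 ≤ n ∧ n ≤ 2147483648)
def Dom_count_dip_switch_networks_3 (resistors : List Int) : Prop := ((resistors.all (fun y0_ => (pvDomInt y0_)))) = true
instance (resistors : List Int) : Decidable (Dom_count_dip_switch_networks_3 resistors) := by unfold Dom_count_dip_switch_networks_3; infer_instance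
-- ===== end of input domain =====

-- B replaces A's O(n^2) doubly nested summation by the closed-form formula n*n*(n+1)*(n+2)//6 (faster).

-- ===== PORT A =====
def count_dip_switch_networks_3 (resistors : List Int) : Int :=
  let r_count : Int := resistors.length
  let count : Int :=
    (PySem.List.pyRange 0 r_count 1).foldl (fun count i =>
      (PySem.List.pyRange 0 (r_count - i) 1).foldl (fun count j =>
        count + (r_count - i - j)) count) 0
  r_count * count

-- ===== PORT B =====
def count_dip_switch_networks_3_alt (resistors : List Int) : Int :=
  let n : Int := resistors.length
  PySem.Int.floordiv (n * n * (n + 1) * (n + 2)) 6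

-- ===== PRECONDITION & SPEC =====
def Spec_count_dip_switch_networks_3 (resistors : List Int) (out : Int) : Prop := out = count_dip_switch_networks_3_alt resistors
instance (resistors : List Int) (out : Int) : Decidable (Spec_count_dip_switch_networks_3 resistors out) := by unfold Spec_count_dip_switch_networks_3; infer_instance

-- ===== CLAIM (what is proved, stated in full; the proofs are below) =====
def Claim_equal_count_dip_switch_networks_3 : Prop := ∀ (resistors : List Int), Dom_count_dip_switch_networks_3 resistors → Spec_count_dip_switch_networks_3 resistors (count_dip_switch_networks_3 resistors)

-- ===== LEMMAS AND PROOFS =====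

-- triangular and tetrahedral numbers, recursively
def pvTri : Nat → Int
  | 0 => 0
  | k + 1 => pvTri k + (k + 1)

def pvTet : Nat → Int
  | 0 => 0
  | n + 1 => pvTet n + pvTri (n + 1)

theorem pvTri_two (k : Nat) : 2 * pvTri k = (k : Int) * (k + 1) := by
  induction k with
  | zero => simp [pvTri]
  | succ k ih => simp only [pvTri]; push_cast at *; linear_combination ih

theorem pvTet_six (n : Nat) : 6 * pvTet n = (n : Int) * (n + 1) * (n + 2) := by
  induction n with
  | zero => simp [pvTet]
  | succ n ih =>
    have h := pvTri_two (n + 1)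
    simp only [pvTet]
    push_cast at *
    linear_combination ih + 3 * h

theorem pvInner (k : Nat) : ∀ (b K c0 : Int), K - b = k →
    (PySem.List.pyRange b K 1).foldl (fun c j => c + (K - j)) c0 = c0 + pvTri k := by
  induction k with
  | zero =>
    intro b K c0 h
    rw [PySem.List.pyRange_one_eq_nil (by omega)]
    simp [pvTri]
  | succ k ih =>
    intro b K c0 h
    rw [PySem.List.pyRange_one_cons (by omega)]
    simp only [List.foldl_cons]
    rw [ih (b + 1) K (c0 + (K - b)) (by omega)]
    have hb : K - b = (k : Int) + 1 := by push_cast at h; omega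
    simp only [pvTri]
    linear_combination hb

theorem pvOuter (n : Nat) : ∀ (a N c0 : Int), N = a + n →
    (PySem.List.pyRange a N 1).foldl (fun c i =>
      (PySem.List.pyRange 0 (N - i) 1).foldl (fun c j => c + (N - i - j)) c) c0
    = c0 + pvTet n := by
  induction n with
  | zero =>
    intro a N c0 h
    rw [PySem.List.pyRange_one_eq_nil (by omega)]
    simp [pvTet]
  | succ n ih =>
    intro a N c0 h
    rw [PySem.List.pyRange_one_cons (by omega)]
    simp only [List.foldl_cons]
    rw [pvInner (n + 1) 0 (N - a) c0 (by push_cast at h ⊢; omega)]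
    rw [ih (a + 1) N (c0 + pvTri (n + 1)) (by push_cast at h; omega)]
    simp only [pvTet]
    ring

-- ===== VERDICT (by name: the statement is the Claim_ definition above) =====
theorem count_dip_switch_networks_3_spec : Claim_equal_count_dip_switch_networks_3 := by
  intro resistors _
  unfold Spec_count_dip_switch_networks_3 count_dip_switch_networks_3 count_dip_switch_networks_3_alt
  set n : Nat := resistors.length with hn
  simp only []
  rw [pvOuter n 0 (n : Int) 0 (by ring)]
  rw [PySem.Int.floordiv_eq_ediv_of_pos (by norm_num)]
  have hB : (n : Int) * (n : Int) * ((n : Int) + 1) * ((n : Int) + 2) = 6 * ((n : Int) * pvTet n) := by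
    linear_combination (-(n : Int)) * pvTet_six n
  rw [hB, Int.mul_ediv_cancel_left _ (by norm_num : (6:Int) ≠ 0)]
  ring
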